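-- pv_equiv track=rewrite | github.com/anupyadav27/threat-engine | engine_secops/scanner_engine/java_scanner/logic_implementations.py | custom_bug_close_brace_beginning_of_line
-- ===== SOURCE A (Python) =====
-- def custom_bug_close_brace_beginning_of_line(node):
--     """
--     Check if close curly braces are at the beginning of a line.
--     Returns True if violations are found (close braces not at beginning).
--     """
--     if isinstance(node, dict):
--         source_code = node.get('source', '')
--         if not source_code:
--             return False
--
--         # Split source into lines
--         lines = source_code.split('\n')
--
--         for line_num, line in enumerate(lines, 1):
--             # Find close braces that are not at the beginning of the line
--             if '}' in line:
--                 # Check if } appears not at the beginning (after other characters)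
--                 for i, char in enumerate(line):
--                     if char == '}':
--                         # Check if there are non-whitespace characters before the }
--                         before_brace = line[:i].strip()
--                         if before_brace:  # There are non-whitespace characters before }
--                             return True
--
--     return False
-- ===== SOURCE B (Python) =====
-- def custom_bug_close_brace_beginning_of_line(node):
--     """Per line, strip once: a violation is a '}' anywhere after the first
--     non-whitespace character, i.e. '}' occurring in line.strip()[1:]."""
--     if not isinstance(node, dict):
--         return False
--     source = node.get('source', '')
--     if not source:
--         return False
--     return any('}' in line.strip()[1:] for line in source.split('\n'))
-- ===== Notes on version B (the rewrite author's own statement) =====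
-- stated objective: simpler
-- what changed: A scans every character of each line and, at every '}', re-slices and re-strips the whole line prefix; B reduces each line to the one-liner test whether '}' occurs in line.strip()[1:], i.e. after the first non-whitespace character.
import Mathlib
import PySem

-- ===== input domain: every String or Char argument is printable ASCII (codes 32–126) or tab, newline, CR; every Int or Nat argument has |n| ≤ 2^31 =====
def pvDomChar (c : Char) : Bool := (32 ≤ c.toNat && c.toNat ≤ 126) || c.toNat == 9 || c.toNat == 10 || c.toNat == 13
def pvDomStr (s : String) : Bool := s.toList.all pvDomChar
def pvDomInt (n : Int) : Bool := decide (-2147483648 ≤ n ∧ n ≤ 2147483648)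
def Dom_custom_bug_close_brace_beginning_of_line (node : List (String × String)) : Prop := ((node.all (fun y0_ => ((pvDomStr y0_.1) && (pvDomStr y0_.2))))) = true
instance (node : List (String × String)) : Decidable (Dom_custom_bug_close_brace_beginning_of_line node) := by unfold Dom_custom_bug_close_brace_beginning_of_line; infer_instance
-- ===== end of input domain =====

-- B: simpler — a violation on a line is just a '}' occurring in line.strip()[1:],
-- replacing A's per-'}' prefix slicing and stripping.

-- ===== PORT A =====
-- inner loop 'for i, char in enumerate(line)': pre is line[:i], maintained incrementally
def pvAScan : List Char → List Char → Bool
  | _, [] => false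
  | pre, c :: rest =>
    if c = '}' then
      if PySem.Chars.strip pre ≠ [] then true else pvAScan (pre ++ [c]) rest
    else pvAScan (pre ++ [c]) rest

-- outer loop 'for line_num, line in enumerate(lines, 1)' (line_num unused)
def pvALines : List (List Char) → Bool
  | [] => false
  | l :: ls =>
    if l.contains '}' then
      if pvAScan [] l then true else pvALines ls
    else pvALines ls

def custom_bug_close_brace_beginning_of_line (node : List (String × String)) : Bool :=
  let source := PySem.Dict.getD (PySem.Dict.mk node) "source" ""
  if source = "" then false
  else pvALines (PySem.Chars.splitOn source.toList ['\n'])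

-- ===== PORT B =====
-- '}' in line.strip()[1:]
def pvBLine (l : List Char) : Bool :=
  (PySem.List.slice (PySem.Chars.strip l) (some 1) none).contains '}'

def custom_bug_close_brace_beginning_of_line_alt (node : List (String × String)) : Bool :=
  let source := PySem.Dict.getD (PySem.Dict.mk node) "source" ""
  if source = "" then false
  else (PySem.Chars.splitOn source.toList ['\n']).any pvBLine

-- ===== PRECONDITION & SPEC =====
def Spec_custom_bug_close_brace_beginning_of_line (node : List (String × String)) (out : Bool) : Prop := out = custom_bug_close_brace_beginning_of_line_alt node
instance (node : List (String × String)) (out : Bool) : Decidable (Spec_custom_bug_close_brace_beginning_of_line node out) := by unfold Spec_custom_bug_close_brace_beginning_of_line; infer_instance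

-- ===== CLAIM =====
def Claim_equal_custom_bug_close_brace_beginning_of_line : Prop := ∀ (node : List (String × String)), Dom_custom_bug_close_brace_beginning_of_line node → Spec_custom_bug_close_brace_beginning_of_line node (custom_bug_close_brace_beginning_of_line node)

-- ===== LEMMAS AND PROOFS =====

-- proof-side: A's inner loop with the prefix abstracted to a seen-non-whitespace flag
def pvSeen : Bool → List Char → Bool
  | _, [] => false
  | seen, c :: rest =>
    if c = '}' && seen then true else pvSeen (seen || !PySem.Chars.isspace c) rest

-- a line without '}' produces no violation
theorem pvAScan_no_brace : ∀ (l pre : List Char), l.contains '}' = false → pvAScan pre l = false := by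
  intro l
  induction l with
  | nil => intro pre _; rfl
  | cons c rest ih =>
    intro pre h
    simp only [List.contains_cons, Bool.or_eq_false_iff] at h
    have hc : ¬ c = '}' := by
      intro hh; subst hh; simp at h
    simp only [pvAScan, if_neg hc]
    exact ih _ (by simpa using h.2)

theorem pvALines_cons (l : List Char) (ls : List (List Char)) :
    pvALines (l :: ls) = (pvAScan [] l || pvALines ls) := by
  by_cases h : l.contains '}' = true
  · simp only [pvALines, h, if_pos]
    cases hA : pvAScan [] l <;> simp
  · have h' : l.contains '}' = false := by simpa using h
    simp only [pvALines, h', Bool.false_eq_true, if_false, pvAScan_no_brace _ _ h', Bool.false_or]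

theorem pvStrip_eq_nil_iff (pre : List Char) :
    PySem.Chars.strip pre = [] ↔ ∀ x ∈ pre, PySem.Chars.isspace x = true := by
  unfold PySem.Chars.strip PySem.Chars.rstrip PySem.Chars.lstrip
  simp only [List.reverse_eq_nil_iff, List.dropWhile_eq_nil_iff, List.mem_reverse]
  constructor
  · intro h x hx
    rcases List.mem_append.mp
        ((List.takeWhile_append_dropWhile (p := PySem.Chars.isspace) (l := pre)) ▸ hx) with h1 | h1
    · exact List.mem_takeWhile_imp h1
    · exact h x h1
  · intro h x hx
    exact h x ((List.dropWhile_sublist _).subset hx)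

-- strip pre is nonempty iff pre has a non-whitespace char
theorem pvStrip_ne_nil_iff (pre : List Char) :
    PySem.Chars.strip pre ≠ [] ↔ pre.any (fun c => !PySem.Chars.isspace c) = true := by
  constructor
  · intro h
    rw [List.any_eq_true]
    by_contra hc
    push Not at hc
    exact h ((pvStrip_eq_nil_iff pre).mpr (fun x hx => by
      have := hc x hx; simpa using this))
  · intro h hnil
    rw [List.any_eq_true] at h
    obtain ⟨x, hx, hxs⟩ := h
    have := (pvStrip_eq_nil_iff pre).mp hnil x hx
    simp [this] at hxs

-- A's inner loop only sees the prefix through 'has it a non-whitespace char'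
theorem pvAScan_eq_pvSeen : ∀ (l pre : List Char),
    pvAScan pre l = pvSeen (pre.any (fun c => !PySem.Chars.isspace c)) l := by
  intro l
  induction l with
  | nil => intro pre; rfl
  | cons c rest ih =>
    intro pre
    have hany : (pre ++ [c]).any (fun c => !PySem.Chars.isspace c)
        = (pre.any (fun c => !PySem.Chars.isspace c) || !PySem.Chars.isspace c) := by simp
    by_cases hbr : c = '}'
    · subst hbr
      have hws : PySem.Chars.isspace '}' = false := by decide
      by_cases hs : PySem.Chars.strip pre ≠ []
      · have hseen := (pvStrip_ne_nil_iff pre).mp hs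
        simp [pvAScan, pvSeen, hs, hseen]
      · have hseen : pre.any (fun c => !PySem.Chars.isspace c) = false := by
          rcases Bool.eq_false_or_eq_true (pre.any (fun c => !PySem.Chars.isspace c)) with hb | hb
          · exact absurd ((pvStrip_ne_nil_iff pre).mpr hb) hs
          · exact hb
        simp only [pvAScan, if_neg hs, ih (pre ++ ['}']), hany, hseen, hws]
        simp [pvSeen, hws]
    · simp only [pvAScan, if_neg hbr, ih (pre ++ [c]), hany]
      simp [pvSeen, hbr]

-- with the flag set, the scan is a plain membership test
theorem pvSeen_true (l : List Char) : pvSeen true l = l.contains '}' := by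
  induction l with
  | nil => rfl
  | cons c rest ih =>
    by_cases hbr : c = '}'
    · subst hbr; simp [pvSeen]
    · have hbr2 : ¬ '}' = c := fun h => hbr h.symm
      simp [pvSeen, hbr, hbr2, ih]

theorem pvRstrip_cons_nonws (c : Char) (r : List Char) (hc : PySem.Chars.isspace c = false) :
    PySem.Chars.rstrip (c :: r) = c :: PySem.Chars.rstrip r := by
  unfold PySem.Chars.rstrip
  rw [List.reverse_cons, List.dropWhile_append]
  by_cases h : (List.dropWhile PySem.Chars.isspace r.reverse) = []
  · simp [h, hc]
  · simp [h]

-- dropping trailing whitespace cannot drop a '}'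
theorem pvMem_rstrip (l : List Char) : '}' ∈ PySem.Chars.rstrip l ↔ '}' ∈ l := by
  unfold PySem.Chars.rstrip
  rw [List.mem_reverse]
  constructor
  · intro h
    exact List.mem_reverse.mp ((List.dropWhile_sublist _).subset h)
  · intro h
    have h' : '}' ∈ l.reverse := List.mem_reverse.mpr h
    rcases List.mem_append.mp
        ((List.takeWhile_append_dropWhile (p := PySem.Chars.isspace) (l := l.reverse)) ▸ h') with h1 | h1
    · exact absurd (List.mem_takeWhile_imp h1) (by decide)
    · exact h1

-- the stripped-tail membership test agrees with the seen-flag scan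
theorem pvSeen_false (l : List Char) :
    pvSeen false l = ((PySem.Chars.strip l).tail).contains '}' := by
  induction l with
  | nil => rfl
  | cons c rest ih =>
    by_cases hws : PySem.Chars.isspace c = true
    · have hcb : ¬ c = '}' := fun hh => by subst hh; exact absurd hws (by decide)
      have hstrip : PySem.Chars.strip (c :: rest) = PySem.Chars.strip rest := by
        unfold PySem.Chars.strip PySem.Chars.lstrip
        simp [hws]
      rw [show pvSeen false (c :: rest) = pvSeen false rest from by simp [pvSeen, hcb, hws],
        hstrip]
      exact ih
    · have hstrip : PySem.Chars.strip (c :: rest) = c :: PySem.Chars.rstrip rest := by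
        unfold PySem.Chars.strip PySem.Chars.lstrip
        rw [List.dropWhile_cons_of_neg (by simp [hws])]
        exact pvRstrip_cons_nonws c rest (by simpa using hws)
      rw [hstrip]
      by_cases hbr : c = '}'
      · subst hbr
        have h1 : (!PySem.Chars.isspace '}') = true := by decide
        simp [pvSeen, h1, pvSeen_true, pvMem_rstrip]
      · have hbr2 : ¬ '}' = c := fun h => hbr h.symm
        simp [pvSeen, hbr, hws, pvSeen_true, pvMem_rstrip]

-- per line: A's scan equals B's stripped-tail membership test
theorem pvLine_eq (l : List Char) : pvAScan [] l = pvBLine l := by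
  rw [pvAScan_eq_pvSeen l [], pvBLine, PySem.List.slice_from_one]
  simpa using pvSeen_false l

theorem pvALines_eq_any (ls : List (List Char)) : pvALines ls = ls.any pvBLine := by
  induction ls with
  | nil => rfl
  | cons l ls ih => rw [pvALines_cons, List.any_cons, ih, pvLine_eq]

-- ===== VERDICT =====
theorem custom_bug_close_brace_beginning_of_line_spec : Claim_equal_custom_bug_close_brace_beginning_of_line := by
  intro node _
  unfold Spec_custom_bug_close_brace_beginning_of_line
  unfold custom_bug_close_brace_beginning_of_line custom_bug_close_brace_beginning_of_line_alt
  by_cases h : PySem.Dict.getD (PySem.Dict.mk node) "source" "" = ""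
  · simp [h]
  · simp only [if_neg h]
    exact pvALines_eq_any _
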